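-- pv_equiv track=rewrite | github.com/do-develop/python_practice | leet1109_corporate_flight_bookings.py | corpFlightBookings
-- ===== SOURCE A (Python) =====
-- from typing import List
--
-- def corpFlightBookings(bookings: List[List[int]], n: int) -> List[int]:
--     result = [0] * (n + 1)
--     # mark head and tail
--     for beg, end, seat in bookings:
--         result[beg - 1] += seat
--         result[end] -= seat
--
--     # cumulative sume processing
--     tmp = 0
--     for i in range(n):
--         tmp += result[i]
--         result[i] = tmp
--     return result[:n]
-- ===== SOURCE B (Python) =====
-- from typing import List
--
-- def corpFlightBookings(bookings: List[List[int]], n: int) -> List[int]: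
--     # each booking is two in-place suffix updates: everyone from flight beg on
--     # gets the seats, everyone from flight end+1 on gives them back
--     # (one spare cell at the end so a booking ending at flight n needs no special case)
--     res = [0] * (n + 1)
--     for beg, end, seat in bookings:
--         res[beg - 1:] = [x + seat for x in res[beg - 1:]]
--         res[end:] = [x - seat for x in res[end:]]
--     return res[:n]
-- ===== Notes on version B (the rewrite author's own statement) =====
-- stated objective: alternative
-- what changed: B performs each booking as two in-place suffix slice updates (add the seats from beg-1 on, subtract them from end on) instead of A's single-cell difference marks followed by a separate prefix-sum pass; B has no second pass and costs O(m*n).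
import Mathlib
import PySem

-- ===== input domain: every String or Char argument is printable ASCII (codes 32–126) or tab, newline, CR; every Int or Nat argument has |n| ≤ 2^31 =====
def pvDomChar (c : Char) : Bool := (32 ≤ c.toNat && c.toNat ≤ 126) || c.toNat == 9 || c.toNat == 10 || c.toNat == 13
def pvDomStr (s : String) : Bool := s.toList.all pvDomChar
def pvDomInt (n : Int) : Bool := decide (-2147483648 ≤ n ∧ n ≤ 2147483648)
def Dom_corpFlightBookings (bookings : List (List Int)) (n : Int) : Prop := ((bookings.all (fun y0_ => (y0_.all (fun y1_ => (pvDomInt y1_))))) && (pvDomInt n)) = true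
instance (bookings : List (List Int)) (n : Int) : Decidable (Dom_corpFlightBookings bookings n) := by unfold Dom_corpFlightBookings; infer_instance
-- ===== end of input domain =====

-- B replaces A's single-cell difference marks + separate prefix-sum pass by two in-place
-- suffix slice updates per booking, with no second pass (alternative; not faster).

-- ===== PORT A =====
-- marking loop body: result[beg-1] += seat; result[end] -= seat  (unpacking a non-triple or an
-- out-of-range index raises in Python: none)
def pvStepA (acc : Option (List Int)) (bk : List Int) : Option (List Int) :=
  acc.bind fun r =>
    match bk with
    | [beg, en, seat] =>
      (PySem.List.pyGet? r (beg - 1)).bind fun v =>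
      (PySem.List.pySet? r (beg - 1) (v + seat)).bind fun r1 =>
      (PySem.List.pyGet? r1 en).bind fun w =>
      PySem.List.pySet? r1 en (w - seat)
    | _ => none

-- cumulative-sum loop body: tmp += result[i]; result[i] = tmp  (i ∈ range(n) is always a valid
-- index there — len(result) = n+1 when the loop is nonempty — so pyGetD/pySetD are exact)
def pvStepP (st : Int × List Int) (i : Int) : Int × List Int :=
  let tmp := st.1 + PySem.List.pyGetD st.2 i 0
  (tmp, PySem.List.pySetD st.2 i tmp)

def corpFlightBookings (bookings : List (List Int)) (n : Int) : List Int :=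
  let result0 := PySem.List.pyRepeat [(0 : Int)] (n + 1)
  match bookings.foldl pvStepA (some result0) with
  | none => []  -- A raised here; such inputs are outside Pre_
  | some marked =>
    let fin := (PySem.List.pyRange 0 n 1).foldl pvStepP ((0 : Int), marked)
    PySem.List.slice fin.2 none (some n)

-- ===== PORT B =====
-- slice assignment res[p:] = L: Python keeps res[:p] and puts L after it; res[:p] is
-- List.take of the clamped start index, so this hand port is exact for every Int p
def pvAssignFrom (r : List Int) (p : Int) (L : List Int) : List Int :=
  r.take (PySem.List.clampIdx r.length p) ++ L

-- loop body: res[beg-1:] = [x + seat for x in res[beg-1:]]; res[end:] = [x - seat for x in res[end:]]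
-- (unpacking a non-triple raises in Python: none; the slices themselves never raise)
def pvStepB (acc : Option (List Int)) (bk : List Int) : Option (List Int) :=
  acc.bind fun r =>
    match bk with
    | [beg, en, seat] =>
      let r1 := pvAssignFrom r (beg - 1)
        ((PySem.List.slice r (some (beg - 1)) none).map (fun x => x + seat))
      some (pvAssignFrom r1 en
        ((PySem.List.slice r1 (some en) none).map (fun x => x - seat)))
    | _ => none

def corpFlightBookings_alt (bookings : List (List Int)) (n : Int) : List Int :=
  match bookings.foldl pvStepB (some (PySem.List.pyRepeat [(0 : Int)] (n + 1))) with
  | none => []  -- B raised here; such inputs are outside Pre_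
  | some r => PySem.List.slice r none (some n)

-- ===== PRECONDITION & SPEC =====
-- Pre_ is exactly A's return domain: every booking is a triple [beg, end, seat] whose two
-- Python indices beg-1 and end are in range for the length-(n+1) result list (negative
-- indices count from the end, as in Python); everywhere else A raises.
def Pre_corpFlightBookings (bookings : List (List Int)) (n : Int) : Prop :=
  ∀ bk ∈ bookings, bk.length = 3 ∧
    PySem.Raise.InRange (n + 1).toNat (PySem.List.pyGetD bk 0 0 - 1) ∧
    PySem.Raise.InRange (n + 1).toNat (PySem.List.pyGetD bk 1 0)
instance (bookings : List (List Int)) (n : Int) : Decidable (Pre_corpFlightBookings bookings n) := by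
  unfold Pre_corpFlightBookings; infer_instance

def pvWitness_corpFlightBookings : List (List Int) × Int := ([[1, 2, 10], [2, 3, 20], [2, 2, 25]], 3)

def Spec_corpFlightBookings (bookings : List (List Int)) (n : Int) (out : List Int) : Prop := out = corpFlightBookings_alt bookings n
instance (bookings : List (List Int)) (n : Int) (out : List Int) : Decidable (Spec_corpFlightBookings bookings n out) := by unfold Spec_corpFlightBookings; infer_instance

-- ===== CLAIM (what is proved, stated in full; the proofs are below) =====
def Claim_equal_corpFlightBookings : Prop := ∀ (bookings : List (List Int)) (n : Int), Dom_corpFlightBookings bookings n → Pre_corpFlightBookings bookings n → Spec_corpFlightBookings bookings n (corpFlightBookings bookings n)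

-- ===== LEMMAS AND PROOFS =====

theorem corpFlightBookings_witness_ok :
    Dom_corpFlightBookings pvWitness_corpFlightBookings.1 pvWitness_corpFlightBookings.2 ∧
    Pre_corpFlightBookings pvWitness_corpFlightBookings.1 pvWitness_corpFlightBookings.2 := by
  decide

-- the position a Python index i denotes in a sequence of length L
def pvNorm (L : Nat) (i : Int) : Nat := if 0 ≤ i then i.toNat else L - (-i).toNat

theorem pv_pyIdx?_eq (L : Nat) (i : Int) (h : PySem.Raise.InRange L i) :
    PySem.List.pyIdx? L i = some (pvNorm L i) := by
  obtain ⟨h1, h2⟩ := h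
  simp only [PySem.List.pyIdx?, pvNorm]
  rw [if_pos (show i < (L:Int) from h2), if_pos (show -(L:Int) ≤ i from h1)]
  by_cases h0 : 0 ≤ i
  · rw [if_pos h0, if_pos h0]
  · rw [if_neg h0, if_neg h0]

theorem pvNorm_lt (L : Nat) (i : Int) (h : PySem.Raise.InRange L i) : pvNorm L i < L := by
  obtain ⟨h1, h2⟩ := h
  simp only [pvNorm]
  split_ifs <;> omega

-- the net difference mark A accumulates at position j
def pvDiffSum (L : Nat) (bookings : List (List Int)) (j : Nat) : Int :=
  (bookings.map (fun bk =>
    (if j = pvNorm L (PySem.List.pyGetD bk 0 0 - 1) then PySem.List.pyGetD bk 2 0 else 0) +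
    (if j = pvNorm L (PySem.List.pyGetD bk 1 0) then -(PySem.List.pyGetD bk 2 0) else 0))).sum

-- the total B accumulates at position j: the two suffix marks that cover it
def pvMarkSum (L : Nat) (bookings : List (List Int)) (j : Nat) : Int :=
  (bookings.map (fun bk =>
    (if pvNorm L (PySem.List.pyGetD bk 0 0 - 1) ≤ j then PySem.List.pyGetD bk 2 0 else 0) +
    (if pvNorm L (PySem.List.pyGetD bk 1 0) ≤ j then -(PySem.List.pyGetD bk 2 0) else 0))).sum

-- getD after set, pointwise (the shape of A's in-place updates)
theorem pv_getD_set (r : List Int) (p : Nat) (h : p < r.length) (v : Int) (j : Nat) :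
    (r.set p v).getD j 0 = if j = p then v else r.getD j 0 := by
  by_cases hj : j = p
  · subst hj; simp [List.getD_eq_getElem?_getD, h]
  · simp [List.getD_eq_getElem?_getD, List.getElem?_set_ne (by omega : p ≠ j), hj]

theorem pv_pyGet?_eq (xs : List Int) (i : Int) (h : PySem.Raise.InRange xs.length i) :
    PySem.List.pyGet? xs i = some (xs.getD (pvNorm xs.length i) 0) := by
  simp only [PySem.List.pyGet?, pv_pyIdx?_eq _ _ h, Option.bind_some]
  rw [List.getD_eq_getElem _ _ (pvNorm_lt _ _ h), List.getElem?_eq_getElem (pvNorm_lt _ _ h)]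

theorem pv_pySet?_eq (xs : List Int) (i v : Int) (h : PySem.Raise.InRange xs.length i) :
    PySem.List.pySet? xs i v = some (xs.set (pvNorm xs.length i) v) := by
  simp only [PySem.List.pySet?, pv_pyIdx?_eq _ _ h, Option.map_some]

theorem pv_getD_replicate (m l : Nat) : (List.replicate m (0 : Int)).getD l 0 = 0 := by
  by_cases h : l < m <;> simp [List.getD_eq_getElem?_getD, h]

-- one marking step of A, pointwise
theorem pvStepA_char (r : List Int) (b e s : Int) (hb : PySem.Raise.InRange r.length (b - 1))
    (he : PySem.Raise.InRange r.length e) :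
    ∃ r', pvStepA (some r) [b, e, s] = some r' ∧ r'.length = r.length ∧
      ∀ j : Nat, r'.getD j 0 = r.getD j 0 +
        ((if j = pvNorm r.length (b - 1) then s else 0) + (if j = pvNorm r.length e then -s else 0)) := by
  have hpl : pvNorm r.length (b - 1) < r.length := pvNorm_lt _ _ hb
  have hql : pvNorm r.length e < r.length := pvNorm_lt _ _ he
  refine ⟨(r.set (pvNorm r.length (b-1)) (r.getD (pvNorm r.length (b-1)) 0 + s)).set (pvNorm r.length e)
      ((r.set (pvNorm r.length (b-1)) (r.getD (pvNorm r.length (b-1)) 0 + s)).getD (pvNorm r.length e) 0 - s),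
      ?_, by simp, ?_⟩
  · rw [pvStepA]
    simp only [Option.bind_some]
    rw [pv_pyGet?_eq r (b-1) hb, Option.bind_some, pv_pySet?_eq r (b-1) _ hb, Option.bind_some,
      pv_pyGet?_eq _ e (by simpa using he), Option.bind_some,
      pv_pySet?_eq _ e _ (by simpa using he)]
    simp only [List.length_set]
  · intro j
    have hql' : pvNorm r.length e < (r.set (pvNorm r.length (b-1)) (r.getD (pvNorm r.length (b-1)) 0 + s)).length := by
      simpa using hql
    simp only [pv_getD_set _ _ hql', pv_getD_set _ _ hpl]
    by_cases h1 : j = pvNorm r.length e <;> by_cases h2 : j = pvNorm r.length (b-1)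
    · subst h1; rw [← h2]; simp
    · subst h1; simp [h2]; omega
    · subst h2; simp [h1]
    · simp [h1, h2]

-- A's marking loop, pointwise
theorem pvFoldA_char (bookings : List (List Int)) : ∀ (r : List Int),
    (∀ bk ∈ bookings, bk.length = 3 ∧
      PySem.Raise.InRange r.length (PySem.List.pyGetD bk 0 0 - 1) ∧
      PySem.Raise.InRange r.length (PySem.List.pyGetD bk 1 0)) →
    ∃ r', bookings.foldl pvStepA (some r) = some r' ∧ r'.length = r.length ∧
      ∀ j : Nat, r'.getD j 0 = r.getD j 0 + pvDiffSum r.length bookings j := by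
  induction bookings with
  | nil => exact fun r _ => ⟨r, rfl, rfl, fun j => by simp [pvDiffSum]⟩
  | cons bk bks ih =>
    intro r h
    obtain ⟨hlen, hb, he⟩ := h bk (by simp)
    rcases bk with _ | ⟨b, _ | ⟨e, _ | ⟨s, _ | _⟩⟩⟩ <;> simp at hlen
    have hb' : PySem.Raise.InRange r.length (b - 1) := by simpa [PySem.List.pyGetD] using hb
    have he' : PySem.Raise.InRange r.length e := by simpa [PySem.List.pyGetD] using he
    obtain ⟨r1, heq1, hlen1, hpt1⟩ := pvStepA_char r b e s hb' he'
    rw [List.foldl_cons, heq1]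
    obtain ⟨r', heq', hlen', hpt'⟩ := ih r1 (fun bk hm => by
      obtain ⟨h1, h2, h3⟩ := h bk (by simp [hm])
      exact ⟨h1, by rw [hlen1]; exact h2, by rw [hlen1]; exact h3⟩)
    refine ⟨r', heq', by rw [hlen', hlen1], fun j => ?_⟩
    rw [hpt', hpt1 j, hlen1]
    simp [pvDiffSum, PySem.List.pyGetD]
    ring

-- A's cumulative-sum loop over range(k, k+m), pointwise
theorem pvFoldP_char : ∀ (m k : Nat) (t : Int) (r : List Int), k + m ≤ r.length →
    ((PySem.List.pyRange (k : Int) ((k : Int) + (m : Int)) 1).foldl pvStepP (t, r)).2.length = r.length ∧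
    (∀ j : Nat, (j < k ∨ k + m ≤ j) →
      ((PySem.List.pyRange (k : Int) ((k : Int) + (m : Int)) 1).foldl pvStepP (t, r)).2.getD j 0 = r.getD j 0) ∧
    (∀ j : Nat, k ≤ j → j < k + m →
      ((PySem.List.pyRange (k : Int) ((k : Int) + (m : Int)) 1).foldl pvStepP (t, r)).2.getD j 0 =
        t + ∑ l ∈ Finset.Ico k (j + 1), r.getD l 0) := by
  intro m
  induction m with
  | zero =>
    intro k t r _
    rw [show (k:Int) + ((0:Nat):Int) = (k:Int) by simp, PySem.List.pyRange_one_eq_nil le_rfl]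
    exact ⟨rfl, fun j _ => rfl, fun j h1 h2 => by omega⟩
  | succ m ih =>
    intro k t r hlen
    rw [PySem.List.pyRange_one_cons (by push_cast; omega : (k:Int) < (k:Int) + ((m+1:Nat):Int)), List.foldl_cons]
    have hkl : k < r.length := by omega
    have hstep : pvStepP (t, r) (k : Int) = (t + r.getD k 0, r.set k (t + r.getD k 0)) := by
      rw [pvStepP]
      simp [PySem.List.pyGetD_natCast, PySem.List.pySetD_natCast]
    rw [hstep]
    rw [show (k:Int) + 1 = ((k+1:Nat):Int) from by push_cast; ring,
      show (k:Int) + ((m+1:Nat):Int) = ((k+1:Nat):Int) + ((m:Nat):Int) from by push_cast; ring]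
    obtain ⟨hl, hout, hin⟩ := ih (k+1) (t + r.getD k 0) (r.set k (t + r.getD k 0)) (by simp; omega)
    have hset : ∀ l : Nat, l ≠ k → (r.set k (t + r.getD k 0)).getD l 0 = r.getD l 0 := by
      intro l hl'
      rw [pv_getD_set _ _ hkl, if_neg hl']
    refine ⟨by rw [hl]; simp, fun j hj => ?_, fun j hj1 hj2 => ?_⟩
    · rw [hout j (by omega), hset j (by omega)]
    · by_cases hjk : j = k
      · subst hjk
        rw [hout j (by omega), pv_getD_set _ _ hkl, if_pos rfl]
        rw [show Finset.Ico j (j+1) = {j} from by ext x; simp]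
        simp
      · rw [hin j (by omega) (by omega)]
        have hsum : ∑ l ∈ Finset.Ico (k+1) (j + 1), (r.set k (t + r.getD k 0)).getD l 0 =
            ∑ l ∈ Finset.Ico (k+1) (j + 1), r.getD l 0 :=
          Finset.sum_congr rfl (fun l hlm => hset l (by simp [Finset.mem_Ico] at hlm; omega))
        rw [hsum, Finset.sum_eq_sum_Ico_succ_bot (by omega : k < j + 1)]
        ring

-- A's value in closed form (prefix sums of the difference marks), for n ≥ 0
theorem pvA_val (bookings : List (List Int)) (n : Int) (hn : 0 ≤ n)
    (hbk : ∀ bk ∈ bookings, bk.length = 3 ∧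
      PySem.Raise.InRange (n + 1).toNat (PySem.List.pyGetD bk 0 0 - 1) ∧
      PySem.Raise.InRange (n + 1).toNat (PySem.List.pyGetD bk 1 0)) :
    corpFlightBookings bookings n = (List.range n.toNat).map
      (fun i => ∑ l ∈ Finset.range (i + 1), pvDiffSum (n + 1).toNat bookings l) := by
  obtain ⟨rA, hAeq, hAlen, hApt⟩ := pvFoldA_char bookings (List.replicate (n+1).toNat 0)
    (fun bk hm => by
      obtain ⟨h1, h2, h3⟩ := hbk bk hm
      exact ⟨h1, by rw [List.length_replicate]; exact h2, by rw [List.length_replicate]; exact h3⟩)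
  rw [List.length_replicate] at hApt
  obtain ⟨hPlen, hPout, hPin⟩ := pvFoldP_char n.toNat 0 0 rA (by rw [hAlen, List.length_replicate]; omega)
  rw [Int.toNat_of_nonneg hn] at hPlen hPout hPin
  simp only [Nat.cast_zero, zero_add] at hPlen hPout hPin
  simp only [corpFlightBookings, PySem.List.pyRepeat_singleton, hAeq]
  rw [PySem.List.slice_to _ hn]
  apply List.ext_getElem
  · simp only [List.length_take, List.length_map, List.length_range, hPlen, hAlen,
      List.length_replicate]
    omega
  · intro i h1 h2
    rw [List.getElem_take, List.getElem_map, List.getElem_range]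
    have hi : i < n.toNat := by
      simp only [List.length_map, List.length_range] at h2
      omega
    have hlt : i < ((PySem.List.pyRange 0 n).foldl pvStepP (0, rA)).2.length := by
      rw [hPlen, hAlen, List.length_replicate]; omega
    rw [← List.getD_eq_getElem _ 0 hlt]
    rw [hPin i (by omega) hi]
    rw [← Finset.range_eq_Ico]
    have hsum : ∑ l ∈ Finset.range (i + 1), rA.getD l 0 =
        ∑ l ∈ Finset.range (i + 1), pvDiffSum (n + 1).toNat bookings l :=
      Finset.sum_congr rfl (fun l _ => by rw [hApt l, pv_getD_replicate, zero_add])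
    rw [hsum]

-- the prefix sum of A's difference marks IS B's suffix-mark total (no side conditions)
theorem pvPrefix_eq_mark (L : Nat) (i : Nat) : ∀ (bookings : List (List Int)),
    ∑ l ∈ Finset.range (i + 1), pvDiffSum L bookings l = pvMarkSum L bookings i := by
  intro bookings
  induction bookings with
  | nil => simp [pvDiffSum, pvMarkSum]
  | cons bk bks ih =>
    have hdist : ∀ l ∈ Finset.range (i + 1), pvDiffSum L (bk :: bks) l =
        ((if l = pvNorm L (PySem.List.pyGetD bk 0 0 - 1) then PySem.List.pyGetD bk 2 0 else 0) +
         (if l = pvNorm L (PySem.List.pyGetD bk 1 0) then -(PySem.List.pyGetD bk 2 0) else 0)) +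
        pvDiffSum L bks l := fun l _ => by simp [pvDiffSum]
    rw [Finset.sum_congr rfl hdist, Finset.sum_add_distrib, Finset.sum_add_distrib, ih,
      Finset.sum_ite_eq' (Finset.range (i+1)), Finset.sum_ite_eq' (Finset.range (i+1))]
    simp only [Finset.mem_range, Nat.lt_succ_iff, pvMarkSum, List.map_cons, List.sum_cons]

-- the clamped slice start agrees with index normalization on in-range indices
theorem pv_clampIdx_eq (L : Nat) (p : Int) (h : PySem.Raise.InRange L p) :
    PySem.List.clampIdx L p = pvNorm L p := by
  obtain ⟨h1, h2⟩ := h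
  by_cases h0 : 0 ≤ p
  · rw [show p = ((p.toNat : Nat) : Int) from by omega, PySem.List.clampIdx_natCast]
    simp only [pvNorm]
    rw [if_pos (by omega)]
    omega
  · rw [show p = -(((-p).toNat : Nat) : Int) from by omega,
      PySem.List.clampIdx_neg_natCast _ _ (by omega)]
    simp only [pvNorm]
    rw [if_neg (by omega)]
    omega

-- B's suffix update res[p:] = [f(x) for x in res[p:]], pointwise
theorem pvAssign_char (r : List Int) (p : Int) (f : Int → Int) (h : PySem.Raise.InRange r.length p) :
    (pvAssignFrom r p ((PySem.List.slice r (some p) none).map f)).length = r.length ∧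
    ∀ j : Nat, j < r.length →
      (pvAssignFrom r p ((PySem.List.slice r (some p) none).map f)).getD j 0 =
        (if pvNorm r.length p ≤ j then f (r.getD j 0) else r.getD j 0) := by
  have hc : PySem.List.clampIdx r.length p = pvNorm r.length p := pv_clampIdx_eq _ _ h
  have hlt : pvNorm r.length p < r.length := pvNorm_lt _ _ h
  rw [pvAssignFrom, PySem.List.slice_some_none, hc]
  constructor
  · simp only [List.length_append, List.length_take, List.length_map, List.length_drop]
    omega
  · intro j hj
    simp only [List.getD_eq_getElem?_getD]
    by_cases hcase : pvNorm r.length p ≤ j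
    · rw [if_pos hcase,
        List.getElem?_append_right (by simp only [List.length_take]; omega),
        List.getElem?_map, List.getElem?_drop]
      rw [show pvNorm r.length p + (j - (r.take (pvNorm r.length p)).length) = j from by
        simp only [List.length_take]; omega]
      rw [List.getElem?_eq_getElem hj]
      simp
    · rw [if_neg hcase,
        List.getElem?_append_left (by simp only [List.length_take]; omega),
        List.getElem?_take]
      rw [if_pos (by omega)]

-- one step of B, pointwise
theorem pvStepB_char (r : List Int) (b e s : Int) (hb : PySem.Raise.InRange r.length (b - 1))
    (he : PySem.Raise.InRange r.length e) :
    ∃ r', pvStepB (some r) [b, e, s] = some r' ∧ r'.length = r.length ∧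
      ∀ j : Nat, j < r.length → r'.getD j 0 = r.getD j 0 +
        ((if pvNorm r.length (b - 1) ≤ j then s else 0) + (if pvNorm r.length e ≤ j then -s else 0)) := by
  obtain ⟨hlen1, hpt1⟩ := pvAssign_char r (b - 1) (fun x => x + s) hb
  set r1 := pvAssignFrom r (b - 1) ((PySem.List.slice r (some (b - 1)) none).map (fun x => x + s)) with hr1
  obtain ⟨hlen2, hpt2⟩ := pvAssign_char r1 e (fun x => x - s) (by rw [hlen1]; exact he)
  refine ⟨_, rfl, by rw [hlen2, hlen1], fun j hj => ?_⟩
  rw [hpt2 j (by omega), hlen1, hpt1 j hj]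
  by_cases h1 : pvNorm r.length e ≤ j <;> by_cases h2 : pvNorm r.length (b - 1) ≤ j <;>
    (simp [h1, h2]; try ring)

-- B's loop over the bookings, pointwise
theorem pvFoldB_char (bookings : List (List Int)) : ∀ (r : List Int),
    (∀ bk ∈ bookings, bk.length = 3 ∧
      PySem.Raise.InRange r.length (PySem.List.pyGetD bk 0 0 - 1) ∧
      PySem.Raise.InRange r.length (PySem.List.pyGetD bk 1 0)) →
    ∃ r', bookings.foldl pvStepB (some r) = some r' ∧ r'.length = r.length ∧
      ∀ j : Nat, j < r.length → r'.getD j 0 = r.getD j 0 + pvMarkSum r.length bookings j := by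
  induction bookings with
  | nil => exact fun r _ => ⟨r, rfl, rfl, fun j _ => by simp [pvMarkSum]⟩
  | cons bk bks ih =>
    intro r h
    obtain ⟨hlen, hb, he⟩ := h bk (by simp)
    rcases bk with _ | ⟨b, _ | ⟨e, _ | ⟨s, _ | _⟩⟩⟩ <;> simp at hlen
    have hb' : PySem.Raise.InRange r.length (b - 1) := by simpa [PySem.List.pyGetD] using hb
    have he' : PySem.Raise.InRange r.length e := by simpa [PySem.List.pyGetD] using he
    obtain ⟨r1, heq1, hlen1, hpt1⟩ := pvStepB_char r b e s hb' he'
    rw [List.foldl_cons, heq1]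
    obtain ⟨r', heq', hlen', hpt'⟩ := ih r1 (fun bk hm => by
      obtain ⟨h1, h2, h3⟩ := h bk (by simp [hm])
      exact ⟨h1, by rw [hlen1]; exact h2, by rw [hlen1]; exact h3⟩)
    refine ⟨r', heq', by rw [hlen', hlen1], fun j hj => ?_⟩
    rw [hpt' j (by omega), hpt1 j hj, hlen1]
    have g0 : PySem.List.pyGetD [b, e, s] 0 0 = b := rfl
    have g1 : PySem.List.pyGetD [b, e, s] 1 0 = e := rfl
    have g2 : PySem.List.pyGetD [b, e, s] 2 0 = s := rfl
    simp only [pvMarkSum, List.map_cons, List.sum_cons, g0, g1, g2]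
    ring

-- B's value in closed form, for n ≥ 0
theorem pvB_val (bookings : List (List Int)) (n : Int) (hn : 0 ≤ n)
    (hbk : ∀ bk ∈ bookings, bk.length = 3 ∧
      PySem.Raise.InRange (n + 1).toNat (PySem.List.pyGetD bk 0 0 - 1) ∧
      PySem.Raise.InRange (n + 1).toNat (PySem.List.pyGetD bk 1 0)) :
    corpFlightBookings_alt bookings n = (List.range n.toNat).map
      (fun i => pvMarkSum (n + 1).toNat bookings i) := by
  obtain ⟨r', heq, hlen, hpt⟩ := pvFoldB_char bookings (List.replicate (n+1).toNat 0)
    (fun bk hm => by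
      obtain ⟨h1, h2, h3⟩ := hbk bk hm
      exact ⟨h1, by rw [List.length_replicate]; exact h2, by rw [List.length_replicate]; exact h3⟩)
  rw [List.length_replicate] at hpt
  simp only [corpFlightBookings_alt, PySem.List.pyRepeat_singleton, heq]
  rw [PySem.List.slice_to _ hn]
  apply List.ext_getElem
  · simp only [List.length_take, hlen, List.length_replicate, List.length_map, List.length_range]
    omega
  · intro i h1 h2
    have hi : i < n.toNat := by simpa using h2
    have hlt : i < r'.length := by rw [hlen, List.length_replicate]; omega
    rw [List.getElem_take, List.getElem_map, List.getElem_range, ← List.getD_eq_getElem _ 0 hlt,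
      hpt i (by omega), pv_getD_replicate, zero_add]

-- ===== VERDICT (by name: the statement is the Claim_ definition above) =====
theorem corpFlightBookings_spec : Claim_equal_corpFlightBookings := by
  intro bookings n _ hbk
  unfold Spec_corpFlightBookings
  unfold Pre_corpFlightBookings at hbk
  by_cases hn : 0 ≤ n
  · rw [pvA_val bookings n hn hbk, pvB_val bookings n hn hbk]
    apply List.map_congr_left
    intro i _
    exact pvPrefix_eq_mark (n + 1).toNat i bookings
  · have hempty : bookings = [] := by
      cases bookings with
      | nil => rfl
      | cons bk bks =>
        exfalso
        obtain ⟨-, hIr, -⟩ := hbk bk (by simp)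
        obtain ⟨hIr1, hIr2⟩ := hIr
        omega
    subst hempty
    simp only [corpFlightBookings, corpFlightBookings_alt, List.foldl_nil,
      PySem.List.pyRepeat_singleton]
    rw [show (n + 1).toNat = 0 from by omega, List.replicate_zero]
    rw [PySem.List.pyRange_one_eq_nil (by omega : n ≤ 0)]
    simp [PySem.List.slice]
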